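-- pv_equiv track=rewrite | github.com/GouravPatidar91/curezy-ai | ai-service/agents/counterfactual_reasoner.py | _pick_key_symptom
-- ===== SOURCE A (Python) =====
-- from typing import List, Dict, Tuple
--
-- def _pick_key_symptom(symptoms: List[str], top_condition: str) -> str:
--     """Pick the most clinically discriminating symptom for the counterfactual."""
--     # Simple heuristic: prefer symptoms that are less common
--     DISCRIMINATING = [
--         "neck stiffness", "meningism", "photophobia",     # Meningitis
--         "left arm", "jaw pain", "radiation",               # ACS
--         "thunderclap", "worst headache",                   # SAH
--         "leg swelling", "recent travel",                   # PE
--         "rebound tenderness", "right lower quadrant",      # Appendicitis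
--         "rash", "petechiae",                               # Meningococcemia
--     ]
--     for d in DISCRIMINATING:
--         for s in symptoms:
--             if d.lower() in s.lower():
--                 return s
--     return symptoms[0] if symptoms else "fever"
-- ===== SOURCE B (Python) =====
-- def _pick_key_symptom(symptoms, top_condition):
--     """Pick the most clinically discriminating symptom for the counterfactual."""
--     DISCRIMINATING = [
--         "neck stiffness", "meningism", "photophobia",     # Meningitis
--         "left arm", "jaw pain", "radiation",               # ACS
--         "thunderclap", "worst headache",                   # SAH
--         "leg swelling", "recent travel",                   # PE
--         "rebound tenderness", "right lower quadrant",      # Appendicitis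
--         "rash", "petechiae",                               # Meningococcemia
--     ]
--     if not symptoms:
--         return "fever"
--
--     def rank(s):
--         sl = s.lower()
--         for i, d in enumerate(DISCRIMINATING):
--             if d in sl:
--                 return i
--         return len(DISCRIMINATING)
--
--     best = symptoms[0]
--     best_r = rank(best)
--     for s in symptoms[1:]:
--         r = rank(s)
--         if r < best_r:
--             best, best_r = s, r
--     return best
-- ===== Notes on version B (the rewrite author's own statement) =====
-- stated objective: alternative
-- what changed: Inverted the nested scans: instead of looping over discriminating terms and scanning all symptoms per term, B makes one pass over the symptoms, computing each symptom's rank (index of the first matching discriminating term, stopping at the first hit) and keeping a stable running argmin; the empty-list and no-match fallbacks fall out of the same pass.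
import Mathlib
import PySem

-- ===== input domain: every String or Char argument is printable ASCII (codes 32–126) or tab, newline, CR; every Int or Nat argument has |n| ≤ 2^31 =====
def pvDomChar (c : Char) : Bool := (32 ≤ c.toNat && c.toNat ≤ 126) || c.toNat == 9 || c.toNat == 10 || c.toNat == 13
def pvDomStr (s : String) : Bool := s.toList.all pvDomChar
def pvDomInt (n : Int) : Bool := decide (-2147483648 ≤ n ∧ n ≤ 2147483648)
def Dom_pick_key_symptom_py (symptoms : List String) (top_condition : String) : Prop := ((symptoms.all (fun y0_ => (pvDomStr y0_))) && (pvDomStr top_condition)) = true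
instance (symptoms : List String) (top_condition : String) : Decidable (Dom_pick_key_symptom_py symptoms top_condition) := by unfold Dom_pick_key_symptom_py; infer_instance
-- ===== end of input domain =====

-- B replaces A's term-first nested scan by one pass over the symptoms keeping a
-- stable running argmin of each symptom's rank (index of first matching term);
-- objective: alternative decomposition, same result.

def pvDISCRIMINATING : List String :=
  ["neck stiffness", "meningism", "photophobia",
   "left arm", "jaw pain", "radiation",
   "thunderclap", "worst headache",
   "leg swelling", "recent travel",
   "rebound tenderness", "right lower quadrant",
   "rash", "petechiae"]

-- ===== PORT A =====
-- inner 'for s in symptoms: если match return s' = first match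
def pvFirstMatch (d : String) (symptoms : List String) : Option String :=
  symptoms.find? (fun s => PySem.Str.isIn (PySem.Str.lower d) (PySem.Str.lower s))

-- outer 'for d in DISCRIMINATING'
def pvOuterA : List String → List String → Option String
  | [], _ => none
  | d :: rest, symptoms =>
      match pvFirstMatch d symptoms with
      | some s => some s
      | none => pvOuterA rest symptoms

def pick_key_symptom_py (symptoms : List String) (top_condition : String) : String :=
  match pvOuterA pvDISCRIMINATING symptoms with
  | some s => s
  | none => match symptoms with
            | [] => "fever"
            | s :: _ => s

-- ===== PORT B =====
-- rank(s): index of the first discriminating term contained in s.lower(), or len(DISCRIMINATING)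
def pvRank : List String → String → Nat
  | [], _ => 0
  | d :: rest, sl => if PySem.Str.isIn d sl then 0 else 1 + pvRank rest sl

-- the argmin loop 'for s in symptoms[1:]'
def pvArgmin (ds : List String) : List String → String → Nat → String
  | [], best, _ => best
  | s :: rest, best, bestR =>
      let r := pvRank ds (PySem.Str.lower s)
      if r < bestR then pvArgmin ds rest s r else pvArgmin ds rest best bestR

def pick_key_symptom_py_alt (symptoms : List String) (top_condition : String) : String :=
  match symptoms with
  | [] => "fever"
  | s0 :: rest => pvArgmin pvDISCRIMINATING rest s0 (pvRank pvDISCRIMINATING (PySem.Str.lower s0))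

-- ===== PRECONDITION & SPEC =====
def Spec_pick_key_symptom_py (symptoms : List String) (top_condition : String) (out : String) : Prop := out = pick_key_symptom_py_alt symptoms top_condition
instance (symptoms : List String) (top_condition : String) (out : String) : Decidable (Spec_pick_key_symptom_py symptoms top_condition out) := by unfold Spec_pick_key_symptom_py; infer_instance

-- ===== CLAIM (what is proved, stated in full; the proofs are below) =====
def Claim_equal_pick_key_symptom_py : Prop := ∀ (symptoms : List String) (top_condition : String), Dom_pick_key_symptom_py symptoms top_condition → Spec_pick_key_symptom_py symptoms top_condition (pick_key_symptom_py symptoms top_condition)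

-- ===== LEMMAS AND PROOFS =====

-- a best of rank 0 never gets replaced
theorem pvArgmin_zero (ds : List String) (rest : List String) (best : String) :
    pvArgmin ds rest best 0 = best := by
  induction rest generalizing best with
  | nil => rfl
  | cons s rest ih => simp [pvArgmin, ih]

-- dropping a term no symptom of the tail matches shifts every rank by one and
-- leaves the argmin decisions unchanged
theorem pvArgmin_shift (d : String) (ds : List String) (rest : List String)
    (h : ∀ s ∈ rest, PySem.Str.isIn d (PySem.Str.lower s) = false) :
    ∀ best bR, pvArgmin (d :: ds) rest best (1 + bR) = pvArgmin ds rest best bR := by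
  induction rest with
  | nil => intro best bR; rfl
  | cons s rest ih =>
      intro best bR
      have hs : PySem.Str.isIn d (PySem.Str.lower s) = false := h s (by simp)
      have hrest : ∀ x ∈ rest, PySem.Str.isIn d (PySem.Str.lower x) = false :=
        fun x hx => h x (by simp [hx])
      simp only [pvArgmin, pvRank, hs, if_false, Bool.false_eq_true]
      by_cases hlt : pvRank ds (PySem.Str.lower s) < bR
      · rw [if_pos (by omega), if_pos hlt]; exact ih hrest _ _
      · rw [if_neg (by omega), if_neg hlt]; exact ih hrest _ _

-- if the current best has positive rank and some tail symptom matches the head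
-- term d, the argmin is the first such symptom
theorem pvArgmin_found (d : String) (ds : List String) :
    ∀ (rest : List String) (best m : String) (bR : Nat), 1 ≤ bR →
    rest.find? (fun s => PySem.Str.isIn d (PySem.Str.lower s)) = some m →
    pvArgmin (d :: ds) rest best bR = m := by
  intro rest
  induction rest with
  | nil => intro best m bR _ hf; simp at hf
  | cons s rest ih =>
      intro best m bR hbR hf
      by_cases hs : PySem.Str.isIn d (PySem.Str.lower s) = true
      · rw [List.find?_cons_of_pos (by simpa using hs)] at hf
        injection hf with hm; subst hm
        simp only [pvArgmin, pvRank, hs, if_true]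
        rw [if_pos (by omega)]
        exact pvArgmin_zero _ _ _
      · have hs' : PySem.Str.isIn d (PySem.Str.lower s) = false := by
          revert hs; cases PySem.Str.isIn d (PySem.Str.lower s) <;> simp
        rw [List.find?_cons_of_neg (by simpa using hs')] at hf
        simp only [pvArgmin, pvRank, hs', if_false, Bool.false_eq_true]
        by_cases hlt : 1 + pvRank ds (PySem.Str.lower s) < bR
        · rw [if_pos hlt]; exact ih _ m _ (by omega) hf
        · rw [if_neg hlt]; exact ih _ m _ hbR hf

-- main bridge: on a nonempty symptom list, A's term-first scan over ds equals
-- B's argmin of per-symptom ranks, provided every term in ds is lowercase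
theorem pv_main (ds : List String) (hl : ∀ d ∈ ds, PySem.Str.lower d = d)
    (s0 : String) (rest : List String) :
    (match pvOuterA ds (s0 :: rest) with
     | some s => s
     | none => s0) = pvArgmin ds rest s0 (pvRank ds (PySem.Str.lower s0)) := by
  induction ds with
  | nil => simp [pvOuterA, pvRank, pvArgmin_zero]
  | cons d ds ih =>
      have hd : PySem.Str.lower d = d := hl d (by simp)
      have hl' : ∀ x ∈ ds, PySem.Str.lower x = x := fun x hx => hl x (by simp [hx])
      by_cases h0 : PySem.Str.isIn d (PySem.Str.lower s0) = true
      · have : pvFirstMatch d (s0 :: rest) = some s0 := by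
          unfold pvFirstMatch
          rw [List.find?_cons_of_pos (by simpa [hd] using h0)]
        simp only [pvOuterA, this, pvRank, h0, if_true]
        rw [pvArgmin_zero]
      · have h0' : PySem.Str.isIn d (PySem.Str.lower s0) = false := by
          revert h0; cases PySem.Str.isIn d (PySem.Str.lower s0) <;> simp
        have hfm : pvFirstMatch d (s0 :: rest)
            = rest.find? (fun s => PySem.Str.isIn d (PySem.Str.lower s)) := by
          unfold pvFirstMatch
          rw [List.find?_cons_of_neg (by simp only [hd]; simpa using h0')]
          simp only [hd]
        cases hfind : rest.find? (fun s => PySem.Str.isIn d (PySem.Str.lower s)) with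
        | some m =>
            simp only [pvOuterA, hfm, hfind, pvRank, h0', if_false, Bool.false_eq_true]
            exact (pvArgmin_found d ds rest s0 m _ (by omega) hfind).symm
        | none =>
            have hnone : ∀ s ∈ rest, PySem.Str.isIn d (PySem.Str.lower s) = false := by
              intro s hs
              have := List.find?_eq_none.mp hfind s hs
              revert this; cases PySem.Str.isIn d (PySem.Str.lower s) <;> simp
            simp only [pvOuterA, hfm, hfind, pvRank, h0', if_false, Bool.false_eq_true]
            rw [pvArgmin_shift d ds rest hnone]
            exact ih hl'

theorem pvOuterA_nil (ds : List String) : pvOuterA ds [] = none := by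
  induction ds with
  | nil => rfl
  | cons d ds ih => simp [pvOuterA, pvFirstMatch, ih]

-- ===== VERDICT (by name: the statement is the Claim_ definition above) =====
theorem pick_key_symptom_py_spec : Claim_equal_pick_key_symptom_py := by
  intro symptoms top_condition _hdom
  unfold Spec_pick_key_symptom_py pick_key_symptom_py pick_key_symptom_py_alt
  cases symptoms with
  | nil => rw [pvOuterA_nil]
  | cons s0 rest =>
      have hl : ∀ d ∈ pvDISCRIMINATING, PySem.Str.lower d = d := by decide
      exact pv_main pvDISCRIMINATING hl s0 rest
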